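-- pv_equiv track=rewrite | github.com/MarcyIvi/Aula_Pest | Marcella.estudos/Study.strings.py/desafio.1.py | meu_lower
-- ===== SOURCE A (Python) =====
-- def meu_lower(str1: str):
--     mini = 'abcdefghijklmnopqrstuvwxyz'
--     gran = 'ABCDEFGHIJKLMNOPQRSTUVWXYZ'
--     tamanho_str  = len(str1)
--     nova_str = ''
--     for i in range(tamanho_str):
--         for g in range(26):
--             if str1[i] == gran[g]:
--                 nova_str += mini[g]
--
--     return nova_str
-- ===== SOURCE B (Python) =====
-- def meu_lower(str1: str):
--     return ''.join(chr(ord(c) + 32) for c in str1 if 'A' <= c <= 'Z')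
-- ===== Notes on version B (the rewrite author's own statement) =====
-- stated objective: faster
-- what changed: B replaces A's nested 26-way linear scan over an uppercase alphabet string with a single join over a generator that gates on 'A' <= c <= 'Z' and computes the lowercase letter by ordinal offset (chr(ord(c)+32)).
import Mathlib
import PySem

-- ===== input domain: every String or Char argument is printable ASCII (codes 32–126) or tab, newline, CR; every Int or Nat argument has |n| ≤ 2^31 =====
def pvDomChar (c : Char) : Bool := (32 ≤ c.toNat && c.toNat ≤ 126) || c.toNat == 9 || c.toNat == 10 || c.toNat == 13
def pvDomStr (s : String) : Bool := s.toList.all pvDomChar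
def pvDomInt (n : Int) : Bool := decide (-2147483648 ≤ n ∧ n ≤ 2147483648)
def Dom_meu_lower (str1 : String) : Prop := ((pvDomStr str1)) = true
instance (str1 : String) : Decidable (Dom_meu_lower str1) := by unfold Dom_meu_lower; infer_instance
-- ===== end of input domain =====

-- B drops A's 26-letter alphabet scan: one pass gated on 'A' ≤ c ≤ 'Z' with the lowercase letter computed by ordinal offset.

-- ===== PORT A =====
def pvMini : List Char := "abcdefghijklmnopqrstuvwxyz".toList
def pvGran : List Char := "ABCDEFGHIJKLMNOPQRSTUVWXYZ".toList

-- inner loop of A: 'for g in range(26): if str1[i] == gran[g]: nova_str += mini[g]'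
def pvInnerA (nova : List Char) (c : Char) : List Char :=
  (PySem.List.pyRange 0 26 1).foldl
    (fun nova2 g =>
      if c = PySem.List.pyGetD pvGran g ' ' then nova2 ++ [PySem.List.pyGetD pvMini g ' ']
      else nova2) nova

def meu_lower (str1 : String) : String :=
  String.mk
    ((PySem.List.pyRange 0 (PySem.Str.len str1) 1).foldl
      (fun nova i => pvInnerA nova (PySem.List.pyGetD str1.toList i ' '))
      [])

-- ===== PORT B =====
def pvLowerB (c : Char) : Option Char :=
  if 'A' ≤ c ∧ c ≤ 'Z' then some (Char.ofNat (c.toNat + 32)) else none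

def meu_lower_alt (str1 : String) : String :=
  String.mk (str1.toList.filterMap pvLowerB)

-- ===== PRECONDITION & SPEC =====
def Spec_meu_lower (str1 : String) (out : String) : Prop := out = meu_lower_alt str1
instance (str1 : String) (out : String) : Decidable (Spec_meu_lower str1 out) := by unfold Spec_meu_lower; infer_instance

-- ===== CLAIM (what is proved, stated in full; the proofs are below) =====
def Claim_equal_meu_lower : Prop := ∀ (str1 : String), Dom_meu_lower str1 → Spec_meu_lower str1 (meu_lower str1)

-- ===== LEMMAS AND PROOFS =====

lemma pvGran_toNat : ∀ k : Fin 26, (pvGran[(k : Nat)]'(by simp [pvGran])).toNat = 65 + (k : Nat) := by decide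

lemma pvMini_toNat : ∀ k : Fin 26, (pvMini[(k : Nat)]'(by simp [pvMini])).toNat = 97 + (k : Nat) := by decide

lemma pvCharOfNat_toNat (n : Nat) (h : n < 55296) : (Char.ofNat n).toNat = n := by
  unfold Char.ofNat
  rw [dif_pos (Or.inl h)]
  simp [Char.ofNatAux, Char.toNat]

lemma char_eq_iff_toNat (a b : Char) : a = b ↔ a.toNat = b.toNat := by
  constructor
  · rintro rfl; rfl
  · intro h
    exact Char.ext (UInt32.toNat_inj.mp h)

lemma pvGetD_gran (g : Int) (h0 : 0 ≤ g) (h1 : g < 26) :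
    (PySem.List.pyGetD pvGran g ' ').toNat = 65 + g.toNat := by
  rw [PySem.List.pyGetD_eq_getElem pvGran ' ' h0 (by simp [pvGran]; omega)]
  exact pvGran_toNat ⟨g.toNat, by omega⟩

lemma pvGetD_mini (g : Int) (h0 : 0 ≤ g) (h1 : g < 26) :
    (PySem.List.pyGetD pvMini g ' ').toNat = 97 + g.toNat := by
  rw [PySem.List.pyGetD_eq_getElem pvMini ' ' h0 (by simp [pvMini]; omega)]
  exact pvMini_toNat ⟨g.toNat, by omega⟩

lemma pvInner_skip (c : Char) : ∀ (l : List Int) (nova : List Char),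
    (∀ g ∈ l, ¬ (c = PySem.List.pyGetD pvGran g ' ')) →
    l.foldl
      (fun nova2 g =>
        if c = PySem.List.pyGetD pvGran g ' ' then nova2 ++ [PySem.List.pyGetD pvMini g ' ']
        else nova2) nova = nova := by
  intro l
  induction l with
  | nil => intro nova _; rfl
  | cons x xs ih =>
    intro nova h
    simp only [List.foldl_cons, if_neg (h x (by simp))]
    exact ih nova (fun g hg => h g (by simp [hg]))

lemma char_le_iff (a b : Char) : a ≤ b ↔ a.toNat ≤ b.toNat := by
  simp [Char.le_def, UInt32.le_iff_toNat_le]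

lemma pvInnerA_eq (nova : List Char) (c : Char) :
    pvInnerA nova c = nova ++ (pvLowerB c).toList := by
  unfold pvInnerA pvLowerB
  by_cases hc : 'A' ≤ c ∧ c ≤ 'Z'
  · have h65 : 65 ≤ c.toNat := (char_le_iff 'A' c).mp hc.1
    have h90 : c.toNat ≤ 90 := (char_le_iff c 'Z').mp hc.2
    set k : Int := (c.toNat : Int) - 65 with hk
    have hsplit : PySem.List.pyRange 0 26 1 =
        PySem.List.pyRange 0 k 1 ++ PySem.List.pyRange k (k + 1) 1 ++ PySem.List.pyRange (k + 1) 26 1 := by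
      rw [← PySem.List.pyRange_one_append 0 k (k+1) (by omega) (by omega),
          ← PySem.List.pyRange_one_append 0 (k+1) 26 (by omega) (by omega)]
    rw [hsplit, List.foldl_append, List.foldl_append]
    rw [pvInner_skip c _ nova (by
      intro g hg
      rw [PySem.List.mem_pyRange_one] at hg
      rw [char_eq_iff_toNat, pvGetD_gran g hg.1 (by omega)]
      omega)]
    rw [PySem.List.pyRange_one_singleton]
    have hck : c = PySem.List.pyGetD pvGran k ' ' := by
      rw [char_eq_iff_toNat, pvGetD_gran k (by omega) (by omega)]; omega
    simp only [List.foldl_cons, List.foldl_nil, if_pos hck]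
    rw [pvInner_skip c _ _ (by
      intro g hg
      rw [PySem.List.mem_pyRange_one] at hg
      rw [char_eq_iff_toNat, pvGetD_gran g (by omega) hg.2]
      omega)]
    rw [if_pos hc]
    have : PySem.List.pyGetD pvMini k ' ' = Char.ofNat (c.toNat + 32) := by
      rw [char_eq_iff_toNat, pvGetD_mini k (by omega) (by omega)]
      rw [pvCharOfNat_toNat _ (by omega)]
      omega
    simp [this]
  · rw [pvInner_skip c _ nova (by
      intro g hg
      rw [PySem.List.mem_pyRange_one] at hg
      rw [char_eq_iff_toNat, pvGetD_gran g hg.1 hg.2]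
      rw [char_le_iff, char_le_iff] at hc
      have : ¬ (65 ≤ c.toNat ∧ c.toNat ≤ 90) := by simpa using hc
      omega)]
    rw [if_neg hc]
    simp

lemma pv_outer (l : List Char) : ∀ (nova : List Char),
    l.foldl pvInnerA nova = nova ++ l.filterMap pvLowerB := by
  induction l with
  | nil => intro nova; simp
  | cons x xs ih =>
    intro nova
    simp only [List.foldl_cons, List.filterMap_cons, ih, pvInnerA_eq]
    cases pvLowerB x <;> simp

-- ===== VERDICT (by name: the statement is the Claim_ definition above) =====
theorem meu_lower_spec : Claim_equal_meu_lower := by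
  intro str1 _
  unfold Spec_meu_lower meu_lower meu_lower_alt
  rw [PySem.Str.len_eq, PySem.List.foldl_pyRange_zero_pyGetD' str1.toList ' ' pvInnerA []]
  rw [pv_outer]
  simp
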